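-- pv_equiv track=rewrite | github.com/naemnamenmea/competitive-programming | google-foobar-py/src/lvl_4/free_the_bunny_prisoners/free_the_bunny_prisoners.py | solution
-- ===== SOURCE A (Python) =====
-- from itertools import combinations
--
-- def solution(num_buns, num_required):
--     if num_required == 1:
--         num_required = num_buns
--     elif num_required == num_buns:
--         num_required = 1
--     else:
--         num_required = num_buns - num_required + 1
--
--     res = [[] for _ in range(num_buns)]
--     i = 0
--     for cmb in combinations(range(num_buns), num_required):
--         for j in cmb:
--             res[j].append(i)
--         i += 1
--
--     return res
-- ===== SOURCE B (Python) =====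
-- def solution(num_buns, num_required):
--     # same num_required -> k transformation as the original
--     if num_required == 1:
--         k = num_buns
--     elif num_required == num_buns:
--         k = 1
--     else:
--         k = num_buns - num_required + 1
--
--     res = [[] for _ in range(num_buns)]
--
--     # recursive backtracking generator: emits k-subsets of the remaining
--     # indices in lexicographic order, distributing key counter i on the fly
--     # (no intermediate list of combinations is ever materialised)
--     def build(chosen, rest, i):
--         if len(chosen) == k:
--             for j in chosen:
--                 res[j].append(i)
--             return i + 1
--         if len(chosen) + len(rest) < k:  # prune: not enough indices left
--             return i
--         if not rest:
--             return i
--         i = build(chosen + [rest[0]], rest[1:], i)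
--         return build(chosen, rest[1:], i)
--
--     build([], list(range(num_buns)), 0)
--     return res
-- ===== Notes on version B (the rewrite author's own statement) =====
-- stated objective: alternative
-- what changed: itertools.combinations plus a counter loop is replaced by a hand-written recursive backtracking function that enumerates k-subsets in the same lexicographic order and distributes the key counter on the fly, never materialising combination tuples.
import Mathlib
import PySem

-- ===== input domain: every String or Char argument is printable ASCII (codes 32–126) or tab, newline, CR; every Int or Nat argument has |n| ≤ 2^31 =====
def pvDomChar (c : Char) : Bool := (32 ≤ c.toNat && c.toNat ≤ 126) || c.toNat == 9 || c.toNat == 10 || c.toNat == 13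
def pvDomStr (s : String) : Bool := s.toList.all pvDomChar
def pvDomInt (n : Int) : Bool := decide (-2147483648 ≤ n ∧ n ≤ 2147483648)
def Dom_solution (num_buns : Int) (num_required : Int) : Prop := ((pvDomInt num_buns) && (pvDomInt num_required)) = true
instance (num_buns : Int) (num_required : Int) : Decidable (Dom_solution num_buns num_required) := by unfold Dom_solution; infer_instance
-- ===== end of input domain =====

-- B replaces itertools.combinations + counter loop by a recursive backtracking
-- enumerator that distributes the key counter on the fly (alternative decomposition).


-- ===== PORT A =====
-- itertools.combinations(range(n), r) in lexicographic order, exact for r ≥ 0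
-- (for r < 0 Python raises ValueError; those inputs are excluded by Pre_solution).
-- the 'if r > n: return' short-circuit of itertools.combinations, then lex order
def pvCombs : Nat → List Nat → List (List Nat)
  | 0, _ => [[]]
  | _ + 1, [] => []
  | r + 1, x :: xs =>
    if xs.length < r then []
    else (pvCombs r xs).map (fun c => x :: c) ++ pvCombs (r + 1) xs

-- 'for j in cmb: res[j].append(i)' followed by 'i += 1' on state (res, i)
def pvEmit (cmb : List Nat) (st : List (List Int) × Int) : List (List Int) × Int :=
  (cmb.foldl (fun r j => r.modify j (fun l => l ++ [st.2])) st.1, st.2 + 1)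

-- the shared num_required -> k transformation (the same three-way branch in A and B)
def pvK (num_buns : Int) (num_required : Int) : Int :=
  if num_required = 1 then num_buns
  else if num_required = num_buns then 1
  else num_buns - num_required + 1

def solution (num_buns : Int) (num_required : Int) : List (List Int) :=
  ((pvCombs (pvK num_buns num_required).toNat (List.range num_buns.toNat)).foldl
      (fun st cmb => pvEmit cmb st) (List.replicate num_buns.toNat [], 0)).1

-- ===== PORT B =====
-- build(chosen, rest, i): if len(chosen)==k emit; prune when too few indices remain;
-- else branch on taking/skipping rest's head
def pvBuild (k : Int) : List Nat → List Nat → List (List Int) × Int → List (List Int) × Int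
  | chosen, rest, st =>
    if (chosen.length : Int) = k then
      (chosen.foldl (fun r j => r.modify j (fun l => l ++ [st.2])) st.1, st.2 + 1)
    else if (chosen.length : Int) + rest.length < k then st
    else
      match rest with
      | [] => st
      | x :: xs => pvBuild k chosen xs (pvBuild k (chosen ++ [x]) xs st)
  termination_by structural _c rest _s => rest

def solution_alt (num_buns : Int) (num_required : Int) : List (List Int) :=
  (pvBuild (pvK num_buns num_required) [] (List.range num_buns.toNat)
      (List.replicate num_buns.toNat [], 0)).1

-- ===== PRECONDITION & SPEC =====
-- Pre_ excludes exactly the inputs where the transformed subset size is negative: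
-- there itertools.combinations raises ValueError, so A returns nothing.
def Pre_solution (num_buns : Int) (num_required : Int) : Prop :=
  0 ≤ pvK num_buns num_required
instance (num_buns : Int) (num_required : Int) : Decidable (Pre_solution num_buns num_required) := by unfold Pre_solution; infer_instance

def pvWitness_solution : Int × Int := (4, 2)

def Spec_solution (num_buns : Int) (num_required : Int) (out : List (List Int)) : Prop := out = solution_alt num_buns num_required
instance (num_buns : Int) (num_required : Int) (out : List (List Int)) : Decidable (Spec_solution num_buns num_required out) := by unfold Spec_solution; infer_instance

-- ===== CLAIM (what is proved, stated in full; the proofs are below) =====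
def Claim_equal_solution : Prop := ∀ (num_buns : Int) (num_required : Int), Dom_solution num_buns num_required → Pre_solution num_buns num_required → Spec_solution num_buns num_required (solution num_buns num_required)

-- ===== LEMMAS AND PROOFS =====

-- pvCombs is empty when fewer elements remain than are to be chosen
theorem pvCombs_nil : ∀ (r : Nat) (xs : List Nat), xs.length < r → pvCombs r xs = [] := by
  intro r xs
  match r, xs with
  | 0, _ => intro h; omega
  | r + 1, [] => intro _; rfl
  | r + 1, x :: xs =>
    intro h
    have : xs.length < r := by simpa using h
    simp [pvCombs, this]

-- the backtracking recursion computes the same fold as emitting each combination,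
-- prefixed by the already-chosen indices
theorem pvBuild_eq_foldl (kN : Nat) :
    ∀ (rest chosen : List Nat) (st : List (List Int) × Int),
      chosen.length ≤ kN →
      pvBuild (kN : Int) chosen rest st
        = ((pvCombs (kN - chosen.length) rest).map (fun c => chosen ++ c)).foldl
            (fun st cmb => pvEmit cmb st) st := by
  intro rest
  induction rest with
  | nil =>
    intro chosen st hle
    rcases Nat.eq_or_lt_of_le hle with heq | hlt
    · rw [pvBuild]
      simp [heq, pvCombs, pvEmit]
    · rw [pvBuild]
      have hne : ((chosen.length : Int) = (kN : Int)) = False := by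
        simp; omega
      obtain ⟨m, hm⟩ : ∃ m, kN - chosen.length = m + 1 := ⟨kN - chosen.length - 1, by omega⟩
      simp [hne, hm, pvCombs]
  | cons x xs ih =>
    intro chosen st hle
    rcases Nat.eq_or_lt_of_le hle with heq | hlt
    · rw [pvBuild]
      simp [heq, pvCombs, pvEmit]
    · rw [pvBuild]
      have hne : ¬ ((chosen.length : Int) = (kN : Int)) := by
        simp; omega
      obtain ⟨m, hm⟩ : ∃ m, kN - chosen.length = m + 1 := ⟨kN - chosen.length - 1, by omega⟩
      by_cases hpr : (chosen.length : Int) + ((x :: xs).length : Nat) < (kN : Int)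
      · -- prune: fewer indices remain than are still to be chosen
        have hlen : (x :: xs).length < kN - chosen.length := by
          simp at hpr ⊢; omega
        rw [if_neg hne, if_pos hpr, pvCombs_nil _ _ hlen]
        simp
      · have hguard : ¬ (xs.length < m) := by
          simp at hpr; omega
        rw [if_neg hne, if_neg hpr]
        simp only [hm, pvCombs, if_neg hguard, List.map_append, List.foldl_append,
          List.map_map]
        have h1 : pvBuild (kN : Int) (chosen ++ [x]) xs st
            = ((pvCombs m xs).map (fun c => (chosen ++ [x]) ++ c)).foldl
                (fun st cmb => pvEmit cmb st) st := by
          have := ih (chosen ++ [x]) st (by simp; omega)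
          have hlen2 : kN - (chosen ++ [x]).length = m := by simp; omega
          rwa [hlen2] at this
        have h2 := ih chosen (pvBuild (kN : Int) (chosen ++ [x]) xs st) hle
        rw [hm] at h2
        rw [h2, h1]
        have hcomp : ((fun c => chosen ++ c) ∘ fun c : List Nat => x :: c)
            = (fun c => (chosen ++ [x]) ++ c) := by
          funext c; simp
        rw [hcomp]

theorem solution_spec : Claim_equal_solution := by
  intro nb nr _ hpre
  unfold Spec_solution solution solution_alt
  unfold Pre_solution at hpre
  have hke : ((pvK nb nr).toNat : Int) = pvK nb nr := by omega
  have h := pvBuild_eq_foldl (pvK nb nr).toNat (List.range nb.toNat) []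
      (List.replicate nb.toNat [], 0) (by simp)
  rw [hke] at h
  rw [h]
  simp
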